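-- pv_equiv track=rewrite | github.com/marzalm/chess_life | tools/extract_lichess_puzzles.py | theme_candidates
-- ===== SOURCE A (Python) =====
-- DIRECT_THEMES = {
--     "fork",
--     "pin",
--     "skewer",
--     "discoveredAttack",
--     "hangingPiece",
--     "sacrifice",
--     "trappedPiece",
--     "attackingF2F7",
--     "mateIn1",
--     "mateIn2",
--     "backRankMate",
--     "opening",
--     "middlegame",
--     "endgame",
--     "deflection",
--     "attraction",
-- }
--
-- OPENING_PREFIXES = {
--     "Ruy_Lopez": "ruyLopez",
--     "Sicilian_Defense": "sicilianDefense",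
--     "French_Defense": "frenchDefense",
--     "Caro-Kann_Defense": "caroKannDefense",
--     "Italian_Game": "italianGame",
--     "Queens_Pawn_Game": "queensPawnGame",
-- }
--
-- THEME_PRIORITY = [
--     "ruyLopez",
--     "sicilianDefense",
--     "frenchDefense",
--     "caroKannDefense",
--     "italianGame",
--     "queensPawnGame",
--     "deflection",
--     "attraction",
--     "attackingF2F7",
--     "trappedPiece",
--     "discoveredAttack",
--     "skewer",
--     "pin",
--     "fork",
--     "sacrifice",
--     "hangingPiece",
--     "mateIn1",
--     "mateIn2",
--     "backRankMate",
--     "opening",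
--     "middlegame",
--     "endgame",
-- ]
--
-- def theme_candidates(row: dict[str, str]) -> list[str]:
--     out = []
--     row_themes = set((row.get("Themes") or "").split())
--     for theme in DIRECT_THEMES:
--         if theme in row_themes:
--             out.append(theme)
--
--     opening_tags = (row.get("OpeningTags") or "").split()
--     for tag in opening_tags:
--         for prefix, theme in OPENING_PREFIXES.items():
--             if tag.startswith(prefix):
--                 out.append(theme)
--
--     # preserve priority order and uniqueness
--     return [theme for theme in THEME_PRIORITY if theme in out]
-- ===== SOURCE B (Python) =====
-- DIRECT_THEMES = {
--     "fork", "pin", "skewer", "discoveredAttack", "hangingPiece", "sacrifice",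
--     "trappedPiece", "attackingF2F7", "mateIn1", "mateIn2", "backRankMate",
--     "opening", "middlegame", "endgame", "deflection", "attraction",
-- }
--
-- OPENING_PREFIXES = {
--     "Ruy_Lopez": "ruyLopez",
--     "Sicilian_Defense": "sicilianDefense",
--     "French_Defense": "frenchDefense",
--     "Caro-Kann_Defense": "caroKannDefense",
--     "Italian_Game": "italianGame",
--     "Queens_Pawn_Game": "queensPawnGame",
-- }
--
-- THEME_PRIORITY = [
--     "ruyLopez", "sicilianDefense", "frenchDefense", "caroKannDefense",
--     "italianGame", "queensPawnGame", "deflection", "attraction",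
--     "attackingF2F7", "trappedPiece", "discoveredAttack", "skewer", "pin",
--     "fork", "sacrifice", "hangingPiece", "mateIn1", "mateIn2", "backRankMate",
--     "opening", "middlegame", "endgame",
-- ]
--
-- # reverse map: opening theme -> its tag prefix (values of OPENING_PREFIXES are distinct)
-- PREFIX_OF = {theme: prefix for prefix, theme in OPENING_PREFIXES.items()}
--
--
-- def theme_candidates(row: dict[str, str]) -> list[str]:
--     row_themes = set((row.get("Themes") or "").split())
--     opening_tags = (row.get("OpeningTags") or "").split()
--
--     def wanted(theme: str) -> bool:
--         if theme in DIRECT_THEMES: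
--             return theme in row_themes
--         prefix = PREFIX_OF.get(theme)
--         return prefix is not None and any(tag.startswith(prefix) for tag in opening_tags)
--
--     return [theme for theme in THEME_PRIORITY if wanted(theme)]
-- ===== Notes on version B (the rewrite author's own statement) =====
-- stated objective: simpler
-- what changed: A's two accumulation loops (direct-theme scan plus nested tag/prefix loop) followed by a de-duplicating priority filter are replaced by a single pass over THEME_PRIORITY that decides each theme's membership directly, using a precomputed reverse map theme->prefix for opening themes.
import Mathlib
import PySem

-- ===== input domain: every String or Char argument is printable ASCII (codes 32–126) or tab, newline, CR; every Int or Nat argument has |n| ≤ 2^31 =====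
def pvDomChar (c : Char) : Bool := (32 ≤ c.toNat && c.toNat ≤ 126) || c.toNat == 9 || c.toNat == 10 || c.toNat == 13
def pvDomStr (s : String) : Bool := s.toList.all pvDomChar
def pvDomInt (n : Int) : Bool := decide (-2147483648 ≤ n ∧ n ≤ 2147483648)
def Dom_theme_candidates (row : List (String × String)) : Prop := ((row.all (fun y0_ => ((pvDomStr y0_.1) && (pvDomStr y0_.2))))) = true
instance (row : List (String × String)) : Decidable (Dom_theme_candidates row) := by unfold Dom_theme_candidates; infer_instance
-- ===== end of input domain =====

-- B replaces A's two accumulation loops plus a final priority filter by a single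
-- priority-ordered membership pass using a precomputed reverse map theme -> prefix (objective: simpler).

-- ===== PORT A =====
def pvDirectThemes : List String :=
  ["fork", "pin", "skewer", "discoveredAttack", "hangingPiece", "sacrifice",
   "trappedPiece", "attackingF2F7", "mateIn1", "mateIn2", "backRankMate",
   "opening", "middlegame", "endgame", "deflection", "attraction"]

def pvOpeningPrefixes : List (String × String) :=
  [("Ruy_Lopez", "ruyLopez"), ("Sicilian_Defense", "sicilianDefense"),
   ("French_Defense", "frenchDefense"), ("Caro-Kann_Defense", "caroKannDefense"),
   ("Italian_Game", "italianGame"), ("Queens_Pawn_Game", "queensPawnGame")]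

def pvThemePriority : List String :=
  ["ruyLopez", "sicilianDefense", "frenchDefense", "caroKannDefense",
   "italianGame", "queensPawnGame", "deflection", "attraction",
   "attackingF2F7", "trappedPiece", "discoveredAttack", "skewer", "pin",
   "fork", "sacrifice", "hangingPiece", "mateIn1", "mateIn2", "backRankMate",
   "opening", "middlegame", "endgame"]

-- A iterates over the Python set DIRECT_THEMES; the result is filtered through
-- THEME_PRIORITY, so it does not depend on that hash order — we use literal order.
-- row.get(k) on the association-list dict: first matching key (convention: lookup = first match)
def pvRowGet (row : List (String × String)) (k : String) : Option String :=
  (row.find? (fun kv => kv.1 == k)).map (fun kv => kv.2)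

def theme_candidates (row : List (String × String)) : List String :=
  let row_themes : PySem.Set String :=
    PySem.Set.ofList (PySem.Str.split₀ ((pvRowGet row "Themes").getD ""))
  let out : List String :=
    pvDirectThemes.foldl (fun out t => if PySem.Set.contains row_themes t then out ++ [t] else out) []
  let opening_tags : List String :=
    PySem.Str.split₀ ((pvRowGet row "OpeningTags").getD "")
  let out : List String :=
    opening_tags.foldl (fun out tag =>
      pvOpeningPrefixes.foldl (fun out pt =>
        if PySem.Str.startswith tag pt.1 then out ++ [pt.2] else out) out) out
  pvThemePriority.filter (fun t => out.contains t)

-- ===== PORT B =====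
-- PREFIX_OF = {theme: prefix for prefix, theme in OPENING_PREFIXES.items()}
def pvPrefixOf : List (String × String) := pvOpeningPrefixes.map (fun pt => (pt.2, pt.1))

def theme_candidates_alt (row : List (String × String)) : List String :=
  let row_themes : PySem.Set String :=
    PySem.Set.ofList (PySem.Str.split₀ ((pvRowGet row "Themes").getD ""))
  let opening_tags : List String :=
    PySem.Str.split₀ ((pvRowGet row "OpeningTags").getD "")
  pvThemePriority.filter (fun theme =>
    if pvDirectThemes.contains theme then
      PySem.Set.contains row_themes theme
    else
      match pvRowGet pvPrefixOf theme with
      | some pfx => opening_tags.any (fun tag => PySem.Str.startswith tag pfx)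
      | none => false)

-- ===== PRECONDITION & SPEC =====
def Spec_theme_candidates (row : List (String × String)) (out : List String) : Prop := out = theme_candidates_alt row
instance (row : List (String × String)) (out : List String) : Decidable (Spec_theme_candidates row out) := by unfold Spec_theme_candidates; infer_instance

-- ===== CLAIM (what is proved, stated in full; the proofs are below) =====
def Claim_equal_theme_candidates : Prop := ∀ (row : List (String × String)), Dom_theme_candidates row → Spec_theme_candidates row (theme_candidates row)

-- ===== LEMMAS AND PROOFS =====

-- membership in a foldl that appends (f b) whenever P b holds
theorem mem_foldl_appendIf {α β : Type} (f : β → α) (P : β → Bool)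
    (l : List β) (acc : List α) (x : α) :
    x ∈ l.foldl (fun a b => if P b then a ++ [f b] else a) acc ↔
      x ∈ acc ∨ ∃ b ∈ l, P b ∧ f b = x := by
  induction l generalizing acc with
  | nil => simp
  | cons b l ih =>
    simp only [List.foldl_cons, ih, List.mem_cons]
    by_cases h : P b <;> simp [h]
    tauto

-- membership in A's nested opening-tag fold
theorem mem_foldl_openings (sw : String → String → Bool)
    (tags : List String) (acc : List String) (x : String) :
    x ∈ tags.foldl (fun a tag =>
        pvOpeningPrefixes.foldl (fun a pt => if sw tag pt.1 then a ++ [pt.2] else a) a) acc ↔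
      x ∈ acc ∨ ∃ tag ∈ tags, ∃ pt ∈ pvOpeningPrefixes, sw tag pt.1 ∧ pt.2 = x := by
  induction tags generalizing acc with
  | nil => simp
  | cons tag tags ih =>
    simp only [List.foldl_cons, ih, List.mem_cons,
      mem_foldl_appendIf (fun pt : String × String => pt.2) (fun pt => sw tag pt.1)]
    aesop

theorem pvOP_snd_not_direct : ∀ pt ∈ pvOpeningPrefixes, pt.2 ∉ pvDirectThemes := by decide

theorem pvOP_snd_inj : ∀ a ∈ pvOpeningPrefixes, ∀ b ∈ pvOpeningPrefixes, a.2 = b.2 → a = b := by decide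

theorem pvPrefixOf_none {t : String} (h : pvRowGet pvPrefixOf t = none) :
    ∀ pt ∈ pvOpeningPrefixes, pt.2 ≠ t := by
  intro pt hpt heq
  simp only [pvRowGet, Option.map_eq_none_iff] at h
  have hmem : (pt.2, pt.1) ∈ pvPrefixOf := by
    simp only [pvPrefixOf, List.mem_map]
    exact ⟨pt, hpt, rfl⟩
  have := List.find?_eq_none.mp h _ hmem
  simp [heq] at this

theorem pvPrefixOf_some {t p : String} (h : pvRowGet pvPrefixOf t = some p) :
    (p, t) ∈ pvOpeningPrefixes := by
  simp only [pvRowGet, Option.map_eq_some_iff] at h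
  obtain ⟨kv, hfind, hp⟩ := h
  have hk : kv.1 = t := by
    have := List.find?_some hfind
    simpa using this
  have hmem : kv ∈ pvPrefixOf := List.mem_of_find?_eq_some hfind
  simp only [pvPrefixOf, List.mem_map] at hmem
  obtain ⟨pt, hpt, hswap⟩ := hmem
  have h1 : pt.2 = kv.1 := congrArg Prod.fst hswap
  have h2 : pt.1 = kv.2 := congrArg Prod.snd hswap
  have : pt = (p, t) := by
    cases pt; cases kv; simp_all
  rwa [this] at hpt

theorem theme_candidates_spec : Claim_equal_theme_candidates := by
  intro row _
  unfold Spec_theme_candidates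
  simp only [theme_candidates, theme_candidates_alt]
  apply List.filter_congr
  intro t _
  rw [Bool.eq_iff_iff]
  rw [List.contains_iff_mem,
    mem_foldl_openings (fun tag pfx => PySem.Str.startswith tag pfx),
    mem_foldl_appendIf (fun s : String => s)
      (fun s => PySem.Set.contains
        (PySem.Set.ofList (PySem.Str.split₀ ((pvRowGet row "Themes").getD ""))) s)]
  simp only [List.not_mem_nil, false_or]
  by_cases hd : t ∈ pvDirectThemes
  · have hdc : pvDirectThemes.contains t = true := by rwa [List.contains_iff_mem]
    rw [hdc]
    simp only [if_true]
    constructor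
    · rintro (⟨b, _, hb, rfl⟩ | ⟨tag, _, pt, hpt, _, rfl⟩)
      · exact hb
      · exact absurd hd (pvOP_snd_not_direct pt hpt)
    · intro h
      exact Or.inl ⟨t, hd, h, rfl⟩
  · have hdc : pvDirectThemes.contains t = false := by
      rw [Bool.eq_false_iff]
      intro hc
      exact hd (List.contains_iff_mem.mp hc)
    rw [hdc, if_neg Bool.false_ne_true]
    cases hpo : pvRowGet pvPrefixOf t with
    | none =>
      constructor
      · rintro (⟨b, hb, _, rfl⟩ | ⟨tag, _, pt, hpt, _, rfl⟩)
        · exact absurd hb hd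
        · exact absurd rfl (pvPrefixOf_none hpo pt hpt)
      · intro h
        exact absurd h (by simp)
    | some p =>
      have hmem := pvPrefixOf_some hpo
      simp only [List.any_eq_true]
      constructor
      · rintro (⟨b, hb, _, rfl⟩ | ⟨tag, htag, pt, hpt, hsw, rfl⟩)
        · exact absurd hb hd
        · have : pt = (p, pt.2) := pvOP_snd_inj pt hpt (p, pt.2) hmem rfl
          exact ⟨tag, htag, by rwa [this] at hsw⟩
      · rintro ⟨tag, htag, hsw⟩
        exact Or.inr ⟨tag, htag, (p, t), hmem, hsw, rfl⟩
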